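-- pv_equiv track=rewrite | github.com/Annshix/Anomaly-Detection | data_pre.py | item_classify
-- ===== SOURCE A (Python) =====
-- def item_classify(item_list, index):
--     user_boundary = [100, 1000, 2000, 5000]
--     item_boundary = [10, 100, 300, 1000]
--     if index == 'user':
--         boundary = user_boundary
--     else:
--         boundary = item_boundary
--     map_set = dict()
--     ans = []
--     for item in item_list:
--         map_set.setdefault(item, 0)
--         map_set[item] += 1
--     for item in item_list:
--         if map_set[item] < boundary[0]:
--             ans.append(1)
--         elif map_set[item] < boundary[1]:
--             ans.append(2)
--         elif map_set[item] < boundary[2]: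
--             ans.append(3)
--         elif map_set[item] < boundary[3]:
--             ans.append(4)
--         else:
--             ans.append(5)
--     return ans
-- ===== SOURCE B (Python) =====
-- def item_classify(item_list, index):
--     user_boundary = [100, 1000, 2000, 5000]
--     item_boundary = [10, 100, 300, 1000]
--     if index == 'user':
--         boundary = user_boundary
--     else:
--         boundary = item_boundary
--     table = {}
--     s = sorted(item_list)
--     n = len(s)
--     i = 0
--     while i < n:
--         j = i + 1
--         while j < n and s[j] == s[i]:
--             j += 1
--         c = j - i
--         if c < boundary[0]:
--             table[s[i]] = 1
--         elif c < boundary[1]: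
--             table[s[i]] = 2
--         elif c < boundary[2]:
--             table[s[i]] = 3
--         elif c < boundary[3]:
--             table[s[i]] = 4
--         else:
--             table[s[i]] = 5
--         i = j
--     return [table[x] for x in item_list]
-- ===== Notes on version B (the rewrite author's own statement) =====
-- stated objective: alternative
-- what changed: Replaces the hash-counting dict and the per-occurrence if/elif pass by a sort-based algorithm: sort the list, scan it once extracting runs of equal elements, classify each run length once into a table, and emit the answer as a lookup per original element.
import Mathlib
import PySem

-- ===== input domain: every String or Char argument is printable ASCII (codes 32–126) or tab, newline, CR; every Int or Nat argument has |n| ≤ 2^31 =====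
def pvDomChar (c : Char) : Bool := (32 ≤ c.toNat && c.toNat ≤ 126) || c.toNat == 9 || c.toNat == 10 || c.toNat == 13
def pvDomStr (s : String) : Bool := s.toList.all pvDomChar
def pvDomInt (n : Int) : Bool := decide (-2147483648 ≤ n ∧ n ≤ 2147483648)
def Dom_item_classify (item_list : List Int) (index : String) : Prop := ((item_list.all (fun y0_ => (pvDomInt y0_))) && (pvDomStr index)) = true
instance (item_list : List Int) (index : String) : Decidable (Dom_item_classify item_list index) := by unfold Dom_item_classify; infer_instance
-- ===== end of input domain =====

-- B replaces A's hash-counting dict and per-occurrence chain by a sort-based algorithm: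
-- sort, scan runs of equal elements, classify each run length once, then look up per element
-- (alternative decomposition; not claimed faster).

-- ===== PORT A =====
-- map_set.getD item 0 is exact for Python's map_set[item]: the key was inserted by the first loop.
def item_classify (item_list : List Int) (index : String) : List Int :=
  let user_boundary : List Int := [100, 1000, 2000, 5000]
  let item_boundary : List Int := [10, 100, 300, 1000]
  let boundary := if index = "user" then user_boundary else item_boundary
  let map_set := item_list.foldl
    (fun d item =>
      let d := d.setdefault item 0          -- map_set.setdefault(item, 0)
      d.insert item (d.getD item 0 + 1))    -- map_set[item] += 1
    (PySem.Dict.empty : PySem.Dict Int Int)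
  item_list.foldl
    (fun ans item =>
      if map_set.getD item 0 < PySem.List.pyGetD boundary 0 0 then ans ++ [1]
      else if map_set.getD item 0 < PySem.List.pyGetD boundary 1 0 then ans ++ [2]
      else if map_set.getD item 0 < PySem.List.pyGetD boundary 2 0 then ans ++ [3]
      else if map_set.getD item 0 < PySem.List.pyGetD boundary 3 0 then ans ++ [4]
      else ans ++ [5]) []

-- ===== PORT B =====
-- the run-extracting while loop of Source B: each outer step takes the run of elements equal to the
-- head (the inner 'while s[j] == s[i]' is the takeWhile/dropWhile split) and records (value, run length)
def pvRuns : List Int → List (Int × Int)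
  | [] => []
  | x :: t => (x, 1 + ((t.takeWhile (fun y => y == x)).length : Int)) ::
      pvRuns (t.dropWhile (fun y => y == x))
  termination_by l => l.length
  decreasing_by
    simp only [List.length_cons]
    exact Nat.lt_succ_of_le (List.dropWhile_sublist _).length_le

-- Source B's if/elif chain on a run length c
def pvBucket (boundary : List Int) (c : Int) : Int :=
  if c < PySem.List.pyGetD boundary 0 0 then 1
  else if c < PySem.List.pyGetD boundary 1 0 then 2
  else if c < PySem.List.pyGetD boundary 2 0 then 3
  else if c < PySem.List.pyGetD boundary 3 0 then 4
  else 5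

-- table.getD x 0 is exact for Python's table[x]: every element of item_list heads some run of sorted(item_list).
def item_classify_alt (item_list : List Int) (index : String) : List Int :=
  let user_boundary : List Int := [100, 1000, 2000, 5000]
  let item_boundary : List Int := [10, 100, 300, 1000]
  let boundary := if index = "user" then user_boundary else item_boundary
  let s := PySem.List.sorted item_list (fun x => x) false
  let table := (pvRuns s).foldl
    (fun d p => d.insert p.1 (pvBucket boundary p.2))
    (PySem.Dict.empty : PySem.Dict Int Int)
  item_list.map (fun x => table.getD x 0)

-- ===== PRECONDITION & SPEC =====
def Spec_item_classify (item_list : List Int) (index : String) (out : List Int) : Prop := out = item_classify_alt item_list index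
instance (item_list : List Int) (index : String) (out : List Int) : Decidable (Spec_item_classify item_list index out) := by unfold Spec_item_classify; infer_instance

-- ===== CLAIM (what is proved, stated in full; the proofs are below) =====
def Claim_equal_item_classify : Prop := ∀ (item_list : List Int) (index : String), Dom_item_classify item_list index → Spec_item_classify item_list index (item_classify item_list index)

-- ===== LEMMAS AND PROOFS =====

-- A's setdefault-then-increment step equals the plain counting insert step.
theorem stepA_eq (d : PySem.Dict Int Int) (k : Int) :
    ((d.setdefault k 0).insert k ((d.setdefault k 0).getD k 0 + 1)) = d.insert k (d.getD k 0 + 1) := by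
  by_cases h : d.contains k = true
  · rw [PySem.Dict.setdefault_of_contains d 0 h]
  · rw [PySem.Dict.setdefault_of_not_contains d 0 (by simpa using h)]
    rw [PySem.Dict.insert_insert_self, PySem.Dict.getD_insert_self,
        PySem.Dict.getD_of_not_contains d 0 (by simpa using h)]

-- A's output loop is a map over item_list.
theorem foldl_chain (boundary : List Int) (m : Int → Int) (l acc : List Int) :
    l.foldl (fun ans item =>
      if m item < PySem.List.pyGetD boundary 0 0 then ans ++ [1]
      else if m item < PySem.List.pyGetD boundary 1 0 then ans ++ [2]
      else if m item < PySem.List.pyGetD boundary 2 0 then ans ++ [3]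
      else if m item < PySem.List.pyGetD boundary 3 0 then ans ++ [4]
      else ans ++ [5]) acc
    = acc ++ l.map (fun x => pvBucket boundary (m x)) := by
  induction l generalizing acc with
  | nil => simp
  | cons x t ih =>
    simp only [List.foldl_cons, List.map_cons]
    split_ifs <;> simp [pvBucket, *]

-- a sorted list's dropWhile (== head) removes all copies of the head
theorem not_mem_dropWhile (x : Int) (t : List Int)
    (h : ∀ y ∈ t, x ≤ y) (hs : t.Pairwise (· ≤ ·)) :
    x ∉ t.dropWhile (fun y => y == x) := by
  induction t with
  | nil => simp
  | cons y t' ih =>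
    rcases List.pairwise_cons.1 hs with ⟨hy, hs'⟩
    by_cases hxy : (y == x) = true
    · simp only [List.dropWhile_cons, hxy, if_pos]
      exact ih (fun z hz => h z (List.mem_cons_of_mem _ hz)) hs'
    · simp only [List.dropWhile_cons, hxy]
      have hne : y ≠ x := by simpa using hxy
      intro hmem
      rcases List.mem_cons.1 hmem with h1 | h2
      · exact hne h1.symm
      · have hxley : x ≤ y := h y (List.mem_cons_self)
        have : y ≤ x := hy x h2
        exact hne (le_antisymm this hxley)

-- keys of pvRuns are members of the list
theorem runs_keys_mem (l : List Int) : ∀ p ∈ pvRuns l, p.1 ∈ l := by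
  induction l using pvRuns.induct with
  | case1 => simp [pvRuns]
  | case2 x t ih =>
    intro p hp
    rw [pvRuns] at hp
    rcases List.mem_cons.1 hp with h1 | h2
    · simp [h1]
    · exact List.mem_cons_of_mem _ ((List.dropWhile_sublist _).mem (ih p h2))

-- on a sorted list the run keys are distinct
theorem runs_keys_nodup (l : List Int) (hs : l.Pairwise (· ≤ ·)) :
    ((pvRuns l).map Prod.fst).Nodup := by
  induction l using pvRuns.induct with
  | case1 => simp [pvRuns]
  | case2 x t ih =>
    rw [pvRuns]
    rcases List.pairwise_cons.1 hs with ⟨hle, hs'⟩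
    have hsd : (t.dropWhile (fun y => y == x)).Pairwise (· ≤ · : Int → Int → Prop) :=
      hs'.sublist (List.dropWhile_sublist _)
    refine List.nodup_cons.2 ⟨?_, ih hsd⟩
    intro hmem
    rcases List.mem_map.1 hmem with ⟨p, hp, hpe⟩
    have : p.1 ∈ t.dropWhile (fun y => y == x) := runs_keys_mem _ p hp
    rw [hpe] at this
    exact not_mem_dropWhile x t hle hs' this

-- on a sorted list each member's run length is its count
theorem runs_mem_count (l : List Int) (hs : l.Pairwise (· ≤ ·)) :
    ∀ x ∈ l, (x, (l.count x : Int)) ∈ pvRuns l := by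
  induction l using pvRuns.induct with
  | case1 => simp
  | case2 x0 t ih =>
    intro x hx
    rcases List.pairwise_cons.1 hs with ⟨hle, hs'⟩
    have hsd : (t.dropWhile (fun y => y == x0)).Pairwise (· ≤ · : Int → Int → Prop) :=
      hs'.sublist (List.dropWhile_sublist _)
    have hsplit : t.takeWhile (fun y => y == x0) ++ t.dropWhile (fun y => y == x0) = t :=
      List.takeWhile_append_dropWhile
    rw [pvRuns]
    by_cases hxx : x = x0
    · subst hxx
      have hcd : (t.dropWhile (fun y => y == x)).count x = 0 :=
        List.count_eq_zero.2 (not_mem_dropWhile x t hle hs')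
    -- every element of the takeWhile equals x
      have hct : (t.takeWhile (fun y => y == x)).count x = (t.takeWhile (fun y => y == x)).length := by
        refine List.count_eq_length.2 (fun b hb => ?_)
        have hb' : (b == x) = true := List.mem_takeWhile_imp (p := fun y => y == x) (l := t) hb
        exact (eq_of_beq hb').symm
      have hsplitc : t.count x = (t.takeWhile (fun y => y == x)).count x
          + (t.dropWhile (fun y => y == x)).count x := by
        conv_lhs => rw [← hsplit]
        rw [List.count_append]
      have hcount : (x :: t).count x = 1 + (t.takeWhile (fun y => y == x)).length := by
        rw [List.count_cons_self, hsplitc, hcd, hct]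
        omega
      refine List.mem_cons.2 (Or.inl ?_)
      rw [hcount]
      push_cast
      ring_nf
    · have hxt : x ∈ t := (List.mem_cons.1 hx).resolve_left hxx
      have hnt : x ∉ t.takeWhile (fun y => y == x0) := by
        intro hmem
        exact hxx (by simpa using List.mem_takeWhile_imp hmem)
      have hxd : x ∈ t.dropWhile (fun y => y == x0) := by
        rcases List.mem_append.1 (hsplit ▸ hxt) with h1 | h2
        · exact absurd h1 hnt
        · exact h2
      have hct : (t.takeWhile (fun y => y == x0)).count x = 0 := List.count_eq_zero.2 hnt
      have hsplitc : t.count x = (t.takeWhile (fun y => y == x0)).count x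
          + (t.dropWhile (fun y => y == x0)).count x := by
        conv_lhs => rw [← hsplit]
        rw [List.count_append]
      have hcount : (x0 :: t).count x = (t.dropWhile (fun y => y == x0)).count x := by
        rw [List.count_cons_of_ne (Ne.symm hxx), hsplitc, hct]
        omega
      rw [hcount]
      exact List.mem_cons_of_mem _ (ih hsd x hxd)

-- B's table lookup at any element of the list is the bucket of its count
theorem table_getD (boundary : List Int) (l : List Int) (x : Int) (hx : x ∈ l) :
    ((pvRuns (PySem.List.sorted l (fun x => x) false)).foldl
      (fun d p => d.insert p.1 (pvBucket boundary p.2))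
      (PySem.Dict.empty : PySem.Dict Int Int)).getD x 0
    = pvBucket boundary (l.count x) := by
  set s := PySem.List.sorted l (fun x => x) false with hsdef
  have hperm : s.Perm l := PySem.List.sorted_perm l (fun x => x) false
  have hs : s.Pairwise (· ≤ · : Int → Int → Prop) := PySem.List.sorted_pairwise l (fun x => x)
  have hnodup : ((pvRuns s).map Prod.fst).Nodup := runs_keys_nodup s hs
  have hitems :
      ((pvRuns s).foldl (fun d p => d.insert p.1 (pvBucket boundary p.2))
        (PySem.Dict.empty : PySem.Dict Int Int)).items
      = (pvRuns s).map (fun p => (p.1, pvBucket boundary p.2)) := by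
    rw [PySem.Dict.items_foldl_insert_fresh (pvRuns s) Prod.fst
          (fun p => pvBucket boundary p.2) PySem.Dict.empty (fun a _ => by simp) hnodup]
    simp [PySem.Dict.empty]
  have hxs : x ∈ s := hperm.mem_iff.2 hx
  have hcnt : s.count x = l.count x := hperm.count_eq x
  have hmem : (x, pvBucket boundary (l.count x)) ∈
      ((pvRuns s).foldl (fun d p => d.insert p.1 (pvBucket boundary p.2))
        (PySem.Dict.empty : PySem.Dict Int Int)).items := by
    rw [hitems]
    refine List.mem_map.2 ⟨(x, (s.count x : Int)), runs_mem_count s hs x hxs, ?_⟩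
    simp [hcnt]
  have hnd : ((pvRuns s).foldl (fun d p => d.insert p.1 (pvBucket boundary p.2))
        (PySem.Dict.empty : PySem.Dict Int Int)).keys.Nodup :=
    PySem.Dict.nodup_keys_foldl_insert_key _ _ _ _ (by simp)
  exact PySem.Dict.getD_of_mem_items _ hmem hnd 0

-- ===== VERDICT (by name: the statement is the Claim_ definition above) =====
theorem item_classify_spec : Claim_equal_item_classify := by
  intro item_list index _
  unfold Spec_item_classify item_classify item_classify_alt
  simp only [stepA_eq, PySem.Dict.foldl_insert_getD_add_one_eq_counter]
  rw [foldl_chain _ (fun item => (PySem.Dict.counter item_list).getD item 0) item_list []]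
  simp only [List.nil_append]
  refine List.map_congr_left (fun x hx => ?_)
  rw [table_getD _ item_list x hx, PySem.Dict.getD_counter]
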